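-- pv_equiv track=rewrite | github.com/BejenaruIoanMatei/SudokuStenography | core/sudoku/decoder.py | decode_message_from_sudoku
-- ===== SOURCE A (Python) =====
-- def decode_message_from_sudoku(grid, message_length):
--     flat_grid = sum(grid, [])
--     bits_needed = message_length * 8
--     bits = []
--
--     for val in flat_grid:
--         if val != 0 and len(bits) < bits_needed:
--             bits.append(str(val & 1))
--
--     if len(bits) < bits_needed:
--         raise ValueError("Grid does not contain enough data to decode the full message.")
--
--     chars = [chr(int(''.join(bits[i:i+8]), 2)) for i in range(0, bits_needed, 8)]
--     return ''.join(chars)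
-- ===== SOURCE B (Python) =====
-- def decode_message_from_sudoku(grid, message_length):
--     if message_length <= 0:
--         return ''
--     out = []
--     acc = 0
--     nbits = 0
--     for row in grid:
--         for val in row:
--             if val != 0:
--                 acc = acc * 2 + (val & 1)
--                 nbits += 1
--                 if nbits == 8:
--                     out.append(chr(acc))
--                     acc = 0
--                     nbits = 0
--                     if len(out) == message_length:
--                         return ''.join(out)
--     raise ValueError("Grid does not contain enough data to decode the full message.")
-- ===== Notes on version B (the rewrite author's own statement) =====
-- stated objective: alternative
-- what changed: Replaces A's three-phase pipeline (flatten, build an intermediate list of bit strings, then join/slice/int-parse each 8-bit chunk) with a single streaming pass over the rows that folds each LSB into an integer accumulator and emits a character every 8 bits, stopping early once message_length characters are produced.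
import Mathlib
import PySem

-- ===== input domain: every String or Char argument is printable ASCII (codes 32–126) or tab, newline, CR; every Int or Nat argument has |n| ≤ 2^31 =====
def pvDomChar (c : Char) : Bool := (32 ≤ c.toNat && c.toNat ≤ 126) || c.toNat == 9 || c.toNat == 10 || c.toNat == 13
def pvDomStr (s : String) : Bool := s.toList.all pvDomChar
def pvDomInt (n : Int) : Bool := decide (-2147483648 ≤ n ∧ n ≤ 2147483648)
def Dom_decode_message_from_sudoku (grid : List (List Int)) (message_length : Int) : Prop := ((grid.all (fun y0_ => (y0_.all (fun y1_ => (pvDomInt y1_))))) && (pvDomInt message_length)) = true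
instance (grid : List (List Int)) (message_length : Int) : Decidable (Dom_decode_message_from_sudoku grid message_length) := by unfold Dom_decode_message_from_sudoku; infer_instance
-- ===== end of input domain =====

-- B replaces A's flatten → bit-string list → join/slice/int-parse pipeline by one streaming pass
-- over the rows with an integer accumulator and early return (objective: alternative decomposition).


-- ===== PORT A =====
-- the 'for val in flat_grid' loop: state is the accumulated list 'bits' of "0"/"1" strings
def pvBitsLoopA (bits_needed : Int) : List Int → List String → List String
  | [], bits => bits
  | v :: vs, bits =>
      pvBitsLoopA bits_needed vs
        (if v ≠ 0 ∧ (bits.length : Int) < bits_needed then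
          bits ++ [PySem.Int.toStr (PySem.Int.band v 1)] else bits)

-- chr(x) is Char.ofNat x.toNat — exact here: x = int(8 binary digits, 2) ∈ [0, 256).
-- int(s, 2) is PySem.Int.ofStrBase? s 2; '.getD 0' is never taken (s is 8 binary digits).
def decode_message_from_sudoku (grid : List (List Int)) (message_length : Int) : String :=
  let flat_grid := grid.flatten
  let bits_needed := message_length * 8
  let bits := pvBitsLoopA bits_needed flat_grid []
  if (bits.length : Int) < bits_needed then ""   -- Python raises ValueError here; excluded by Pre_
  else
    let chars := (PySem.List.pyRange 0 bits_needed 8).map (fun i =>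
      String.ofList [Char.ofNat ((PySem.Int.ofStrBase?
        (PySem.Str.join "" (PySem.List.slice bits (some i) (some (i + 8)))) 2).getD 0).toNat])
    PySem.Str.join "" chars

-- ===== PORT B =====
-- inner 'for val in row' loop; Sum.inl = the early 'return', Sum.inr = fall through to next row
def pvAltRow (ml : Int) : List Int → List Char → Int → Int → String ⊕ (List Char × Int × Int)
  | [], out, acc, nbits => Sum.inr (out, acc, nbits)
  | v :: vs, out, acc, nbits =>
    if v ≠ 0 then
      let acc' := acc * 2 + PySem.Int.band v 1
      let nbits' := nbits + 1
      if nbits' = 8 then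
        let out' := out ++ [Char.ofNat acc'.toNat]   -- chr(acc): acc ∈ [0, 256), exact
        if (out'.length : Int) = ml then Sum.inl (String.ofList out')   -- ''.join(out)
        else pvAltRow ml vs out' 0 0
      else pvAltRow ml vs out acc' nbits'
    else pvAltRow ml vs out acc nbits

-- outer 'for row in grid' loop; none = falling off the end (Python raises ValueError)
def pvAltRows (ml : Int) : List (List Int) → List Char → Int → Int → Option String
  | [], _, _, _ => none
  | r :: rs, out, acc, nbits =>
    match pvAltRow ml r out acc nbits with
    | Sum.inl s => some s
    | Sum.inr (out', acc', nbits') => pvAltRows ml rs out' acc' nbits'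

def decode_message_from_sudoku_alt (grid : List (List Int)) (message_length : Int) : String :=
  if message_length ≤ 0 then ""
  else (pvAltRows message_length grid [] 0 0).getD ""   -- none = ValueError; excluded by Pre_

-- ===== PRECONDITION & SPEC =====
-- Pre_ excludes exactly the inputs where A raises ValueError: a positive message_length needing
-- more bits than there are nonzero cells.
def Pre_decode_message_from_sudoku (grid : List (List Int)) (message_length : Int) : Prop :=
  message_length ≤ 0 ∨
    8 * message_length ≤ ((grid.flatten.filter (fun v => v != 0)).length : Int)
instance (grid : List (List Int)) (message_length : Int) : Decidable (Pre_decode_message_from_sudoku grid message_length) := by unfold Pre_decode_message_from_sudoku; infer_instance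

def pvWitness_decode_message_from_sudoku : List (List Int) × Int :=
  ([[72, 0, 1], [2, 1, 0], [0, 3, 5], [1, 1, 1]], 1)

def Spec_decode_message_from_sudoku (grid : List (List Int)) (message_length : Int) (out : String) : Prop := out = decode_message_from_sudoku_alt grid message_length
instance (grid : List (List Int)) (message_length : Int) (out : String) : Decidable (Spec_decode_message_from_sudoku grid message_length out) := by unfold Spec_decode_message_from_sudoku; infer_instance

-- ===== CLAIM (what is proved, stated in full; the proofs are below) =====
def Claim_equal_decode_message_from_sudoku : Prop := ∀ (grid : List (List Int)) (message_length : Int), Dom_decode_message_from_sudoku grid message_length → Pre_decode_message_from_sudoku grid message_length → Spec_decode_message_from_sudoku grid message_length (decode_message_from_sudoku grid message_length)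

-- ===== LEMMAS AND PROOFS =====
-- the common middle form: the nonzero cells' LSB stream, and the message it encodes
def pvLsb (v : Int) : Int := PySem.Int.band v 1

def pvBits (grid : List (List Int)) : List Int :=
  (grid.flatten.filter (fun v => v != 0)).map pvLsb

def pvByte (bs : List Int) : Int := bs.foldl (fun a b => a * 2 + b) 0

def pvMsg : Nat → List Int → List Char
  | 0, _ => []
  | k + 1, bs => Char.ofNat (pvByte (bs.take 8)).toNat :: pvMsg k (bs.drop 8)

theorem pvLsb_cases (v : Int) : pvLsb v = 0 ∨ pvLsb v = 1 := by
  simpa [pvLsb, PySem.Int.band_one] using PySem.Int.mod_two_eq v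

-- ---- A side ----
theorem pvBitsLoopA_eq (n : Int) : ∀ (vs : List Int) (bits : List String),
    pvBitsLoopA n vs bits =
      bits ++ (((vs.filter (fun v => v != 0)).map (fun v => PySem.Int.toStr (pvLsb v))).take
        (n - bits.length).toNat) := by
  intro vs
  induction vs with
  | nil => intro bits; simp [pvBitsLoopA]
  | cons v vs ih =>
    intro bits
    by_cases hv : v = 0
    · subst hv
      simp only [pvBitsLoopA, ne_eq, not_true_eq_false, false_and, if_false]
      rw [ih]
      simp
    · by_cases hlt : (bits.length : Int) < n
      · simp only [pvBitsLoopA, ne_eq, hv, not_false_eq_true, hlt, and_self, if_true]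
        rw [ih]
        have h1 : (n - ((bits ++ [PySem.Int.toStr (PySem.Int.band v 1)]).length : Int)).toNat
            = (n - bits.length).toNat - 1 := by
          simp only [List.length_append, List.length_cons, List.length_nil]; push_cast; omega
        have h2 : 1 ≤ (n - (bits.length : Int)).toNat := by omega
        simp only [List.filter_cons, hv, bne_iff_ne, ne_eq, not_false_eq_true, decide_true,
          List.map_cons, h1]
        rw [List.append_assoc]
        congr 1
        obtain ⟨m, hm⟩ : ∃ m, (n - (bits.length:Int)).toNat = m + 1 := ⟨(n - (bits.length:Int)).toNat - 1, by omega⟩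
        rw [hm]
        simp [pvLsb, List.take_succ_cons]
      · simp only [pvBitsLoopA, ne_eq, hv, not_false_eq_true, hlt, and_false, if_false, true_and]
        rw [ih]
        have h0 : (n - (bits.length : Int)).toNat = 0 := by omega
        simp [h0, List.filter_cons, hv]
theorem pvChunkVal (b1 b2 b3 b4 b5 b6 b7 b8 : Int)
    (h1 : b1 = 0 ∨ b1 = 1) (h2 : b2 = 0 ∨ b2 = 1) (h3 : b3 = 0 ∨ b3 = 1) (h4 : b4 = 0 ∨ b4 = 1)
    (h5 : b5 = 0 ∨ b5 = 1) (h6 : b6 = 0 ∨ b6 = 1) (h7 : b7 = 0 ∨ b7 = 1) (h8 : b8 = 0 ∨ b8 = 1) :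
    (PySem.Int.ofStrBase? (PySem.Str.join ""
        ([b1, b2, b3, b4, b5, b6, b7, b8].map PySem.Int.toStr)) 2).getD 0
      = pvByte [b1, b2, b3, b4, b5, b6, b7, b8] := by
  rcases h1 with rfl | rfl <;> rcases h2 with rfl | rfl <;> rcases h3 with rfl | rfl <;>
    rcases h4 with rfl | rfl <;> rcases h5 with rfl | rfl <;> rcases h6 with rfl | rfl <;>
    rcases h7 with rfl | rfl <;> rcases h8 with rfl | rfl <;> decide
theorem pvRangeMapCons {α : Type} (f : Nat → α) (k : Nat) :
    (List.range (k + 1)).map f = f 0 :: (List.range k).map (fun j => f (j + 1)) := by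
  rw [List.range_succ_eq_map]
  simp [List.map_map, Function.comp]

theorem pvCharsA (k : Nat) : ∀ (bs : List Int) (FULL : List String) (off : Nat),
    FULL.drop off = bs.map PySem.Int.toStr → bs.length = 8 * k →
    (∀ b ∈ bs, b = 0 ∨ b = 1) →
    (List.range k).map (fun (j : Nat) =>
        String.ofList [Char.ofNat ((PySem.Int.ofStrBase? (PySem.Str.join ""
          (PySem.List.slice FULL (some ((off : Int) + 8 * j)) (some ((off : Int) + 8 * j + 8)))) 2).getD 0).toNat])
      = (pvMsg k bs).map (fun c => String.ofList [c]) := by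
  induction k with
  | zero => intro bs FULL off _ _ _; simp [pvMsg]
  | succ k ih =>
    intro bs FULL off hdrop hlen hb
    match bs, hlen with
    | b1 :: b2 :: b3 :: b4 :: b5 :: b6 :: b7 :: b8 :: tl, hlen =>
    have htl : tl.length = 8 * k := by simp at hlen; omega
    have hslice : ∀ (j : Nat),
        PySem.List.slice FULL (some ((off : Int) + 8 * j)) (some ((off : Int) + 8 * j + 8))
          = (FULL.drop (off + 8 * j)).take 8 := by
      intro j
      rw [PySem.List.slice_toNat _ (by positivity) (by positivity)]
      have e1 : (((off : Int) + 8 * j)).toNat = off + 8 * j := by omega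
      have e2 : (((off : Int) + 8 * j + 8)).toNat = off + 8 * j + 8 := by omega
      rw [e1, e2]
      congr 1
      omega
    have hmsg : pvMsg (k + 1) (b1 :: b2 :: b3 :: b4 :: b5 :: b6 :: b7 :: b8 :: tl)
        = Char.ofNat (pvByte [b1, b2, b3, b4, b5, b6, b7, b8]).toNat :: pvMsg k tl := by
      simp [pvMsg]
    rw [pvRangeMapCons, hmsg, List.map_cons, List.cons_eq_cons]
    refine ⟨?_, ?_⟩
    · rw [hslice 0]
      have e0 : off + 8 * 0 = off := by omega
      rw [e0, hdrop]
      have htake : ((b1 :: b2 :: b3 :: b4 :: b5 :: b6 :: b7 :: b8 :: tl).map PySem.Int.toStr).take 8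
          = [b1, b2, b3, b4, b5, b6, b7, b8].map PySem.Int.toStr := by
        simp
      rw [htake, pvChunkVal b1 b2 b3 b4 b5 b6 b7 b8 (hb b1 (by simp)) (hb b2 (by simp))
        (hb b3 (by simp)) (hb b4 (by simp)) (hb b5 (by simp)) (hb b6 (by simp))
        (hb b7 (by simp)) (hb b8 (by simp))]
    · have hcong : ∀ (j : Nat), j ∈ List.range k →
          String.ofList [Char.ofNat ((PySem.Int.ofStrBase? (PySem.Str.join ""
            (PySem.List.slice FULL (some ((off : Int) + 8 * ((j + 1 : Nat) : Int))) (some ((off : Int) + 8 * ((j + 1 : Nat) : Int) + 8)))) 2).getD 0).toNat]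
          = String.ofList [Char.ofNat ((PySem.Int.ofStrBase? (PySem.Str.join ""
            (PySem.List.slice FULL (some (((off + 8 : Nat) : Int) + 8 * j)) (some (((off + 8 : Nat) : Int) + 8 * j + 8)))) 2).getD 0).toNat] := by
        intro j _
        have e1 : ((off : Int) + 8 * (((j + 1 : Nat)) : Int)) = (((off + 8 : Nat) : Int) + 8 * (j : Int)) := by
          push_cast; ring
        rw [e1]
      rw [List.map_congr_left hcong]
      have hdrop2 : FULL.drop (off + 8) = tl.map PySem.Int.toStr := by
        have hd : FULL.drop (off + 8) = (FULL.drop off).drop 8 := by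
          rw [List.drop_drop]
        rw [hd, hdrop]
        simp
      exact ih tl FULL (off + 8) hdrop2 htl (fun b hbm => hb b (by simp [hbm]))
-- ---- B side ----
-- the bit-level loop both of B's nested loops amount to
def pvAltBits (ml : Int) : List Int → List Char → Int → Int → Option String
  | [], _, _, _ => none
  | b :: bs, out, acc, nbits =>
    let acc' := acc * 2 + b
    let nbits' := nbits + 1
    if nbits' = (8 : Int) then
      let out' := out ++ [Char.ofNat acc'.toNat]
      if (out'.length : Int) = ml then some (String.ofList out') else pvAltBits ml bs out' 0 0
    else pvAltBits ml bs out acc' nbits'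

theorem pvAltRow_eq (ml : Int) : ∀ (row rest : List Int) (out : List Char) (acc nbits : Int),
    (match pvAltRow ml row out acc nbits with
      | Sum.inl s => some s
      | Sum.inr (o, a, n) => pvAltBits ml rest o a n)
      = pvAltBits ml (((row.filter (fun v => v != 0)).map pvLsb) ++ rest) out acc nbits := by
  intro row
  induction row with
  | nil => intro rest out acc nbits; simp [pvAltRow]
  | cons v vs ih =>
    intro rest out acc nbits
    by_cases hv : v = 0
    · subst hv
      simp only [pvAltRow, ne_eq, not_true_eq_false, if_false, List.filter_cons]
      rw [ih]
      simp
    · simp only [pvAltRow, ne_eq, hv, not_false_eq_true, if_true, List.filter_cons,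
        bne_iff_ne, ne_eq, decide_true]
      by_cases h8 : nbits + 1 = (8 : Int)
      · simp only [h8, if_true]
        have hc : ((out ++ [Char.ofNat (acc * 2 + PySem.Int.band v 1).toNat]).length : Int)
            = (out.length : Int) + 1 := by simp
        rw [hc]
        by_cases hml : ((out.length : Int) + 1) = ml
        · simp [pvAltBits, pvLsb, hv, h8, hml, List.length_append]
        · rw [if_neg hml, ih]
          simp [pvAltBits, pvLsb, hv, h8, hml, List.length_append]
      · simp only [h8, if_false]
        rw [ih]
        simp [pvAltBits, pvLsb, hv, h8]
theorem pvAltRows_eq (ml : Int) : ∀ (rows : List (List Int)) (out : List Char) (acc nbits : Int),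
    pvAltRows ml rows out acc nbits
      = pvAltBits ml ((rows.flatten.filter (fun v => v != 0)).map pvLsb) out acc nbits := by
  intro rows
  induction rows with
  | nil => intro out acc nbits; simp [pvAltRows, pvAltBits]
  | cons r rs ih =>
    intro out acc nbits
    simp only [pvAltRows, List.flatten_cons, List.filter_append, List.map_append]
    rw [← pvAltRow_eq ml r ((rs.flatten.filter (fun v => v != 0)).map pvLsb) out acc nbits]
    cases h : pvAltRow ml r out acc nbits with
    | inl s => rfl
    | inr st =>
      obtain ⟨o, a, n⟩ := st
      simp [ih]
theorem pvAltBits_run (ml : Int) : ∀ (k : Nat) (bs rest : List Int) (out : List Char),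
    0 < k → (out.length : Int) + k = ml → bs.length = 8 * k →
    pvAltBits ml (bs ++ rest) out 0 0 = some (String.ofList (out ++ pvMsg k bs)) := by
  intro k
  induction k with
  | zero => intro bs rest out h; omega
  | succ k ih =>
    intro bs rest out _ hml hlen
    match bs, hlen with
    | b1 :: b2 :: b3 :: b4 :: b5 :: b6 :: b7 :: b8 :: tl, hlen =>
    have htl : tl.length = 8 * k := by simp at hlen; omega
    have hmsg : pvMsg (k + 1) (b1 :: b2 :: b3 :: b4 :: b5 :: b6 :: b7 :: b8 :: tl)
        = Char.ofNat (pvByte [b1, b2, b3, b4, b5, b6, b7, b8]).toNat :: pvMsg k tl := by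
      simp [pvMsg]
    simp only [List.cons_append]
    simp only [pvAltBits]
    norm_num
    by_cases hk : k = 0
    · subst hk
      have : (out.length : Int) + 1 = ml := by push_cast at hml ⊢; omega
      have htl0 : tl = [] := by cases tl with | nil => rfl | cons a b => simp at htl
      subst htl0
      simp [List.length_append, this, hmsg, pvMsg, pvByte]
    · have hne : ¬ ((out.length : Int) + 1 = ml) := by omega
      simp only [List.length_append, List.length_cons, List.length_nil, Nat.cast_add,
        Nat.cast_one, Nat.cast_zero, zero_add, hne, if_false]
      rw [ih tl rest (out ++ [Char.ofNat (((((((b1*2+b2)*2+b3)*2+b4)*2+b5)*2+b6)*2+b7)*2+b8).toNat])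
        (by omega) (by simp; push_cast at hml ⊢; omega) htl]
      rw [hmsg]
      congr 1
      simp [pvByte, List.append_assoc]
-- ===== VERDICT (by name: the statement is the Claim_ definition above) =====
theorem decode_message_from_sudoku_spec : Claim_equal_decode_message_from_sudoku := by
  intro grid ml _hdom hpre
  show decode_message_from_sudoku grid ml = decode_message_from_sudoku_alt grid ml
  by_cases hml : ml ≤ 0
  · simp only [decode_message_from_sudoku, decode_message_from_sudoku_alt]
    rw [if_pos hml, pvBitsLoopA_eq]
    have h0 : (ml * 8 - (([] : List String).length : Int)).toNat = 0 := by simp; omega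
    rw [h0]
    simp only [List.take_zero, List.append_nil, List.nil_append, List.length_nil, Nat.cast_zero]
    rw [if_neg (by omega)]
    rw [PySem.List.pyRange_of_pos 0 (ml * 8) (by norm_num)]
    rw [if_neg (by omega)]
    simp
    decide
  · push_neg at hml
    have hcount : 8 * ml ≤ ((grid.flatten.filter (fun v => v != 0)).length : Int) := by
      rcases hpre with h | h
      · omega
      · exact h
    have hk : (ml.toNat : Int) = ml := by omega
    simp only [decode_message_from_sudoku, decode_message_from_sudoku_alt]
    rw [if_neg (show ¬ ml ≤ 0 by omega), pvBitsLoopA_eq]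
    have hn : (ml * 8 - (([] : List String).length : Int)).toNat = 8 * ml.toNat := by
      simp; omega
    rw [hn]
    simp only [List.nil_append]
    have hmapmap : ((grid.flatten.filter (fun v => v != 0)).map
          (fun v => PySem.Int.toStr (pvLsb v))).take (8 * ml.toNat)
        = (((grid.flatten.filter (fun v => v != 0)).map pvLsb).take (8 * ml.toNat)).map
            PySem.Int.toStr := by
      rw [List.map_take, List.map_map]
      rfl
    rw [hmapmap]
    have hbslen : ((((grid.flatten.filter (fun v => v != 0)).map pvLsb).take (8 * ml.toNat))).length
        = 8 * ml.toNat := by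
      rw [List.length_take, List.length_map]
      omega
    rw [if_neg (show ¬ (((((grid.flatten.filter (fun v => v != 0)).map pvLsb).take
        (8 * ml.toNat)).map PySem.Int.toStr).length : Int) < ml * 8 by rw [List.length_map, hbslen]; omega)]
    rw [PySem.List.pyRange_of_pos 0 (ml * 8) (by norm_num), if_pos (show (0:Int) < ml * 8 by omega)]
    have hcnt : ((ml * 8 - 0 + 8 - 1) / 8).toNat = ml.toNat := by
      have e : ml * 8 - 0 + 8 - 1 = 7 + ml * 8 := by ring
      rw [e, Int.add_mul_ediv_right 7 ml (by norm_num : (8:Int) ≠ 0)]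
      omega
    rw [hcnt, List.map_map]
    have hball : ∀ b ∈ List.take (8 * ml.toNat)
        (List.map pvLsb (List.filter (fun v => v != 0) grid.flatten)), b = 0 ∨ b = 1 := by
      intro b hb
      rcases List.mem_map.mp (List.mem_of_mem_take hb) with ⟨v, _, rfl⟩
      exact pvLsb_cases v
    have hchars := pvCharsA ml.toNat (List.take (8 * ml.toNat) (List.map pvLsb (List.filter (fun v => v != 0) grid.flatten)))
      (List.map PySem.Int.toStr (List.take (8 * ml.toNat) (List.map pvLsb (List.filter (fun v => v != 0) grid.flatten)))) 0 (by simp) hbslen hball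
    have hfeq : ((fun i =>
            String.ofList
              [Char.ofNat
                  ((PySem.Int.ofStrBase?
                          (PySem.Str.join ""
                            (PySem.List.slice (List.map PySem.Int.toStr (List.take (8 * ml.toNat) (List.map pvLsb (List.filter (fun v => v != 0) grid.flatten))))
                              (some i) (some (i + 8))))
                          2).getD
                      0).toNat]) ∘ fun (k : Nat) => (0 : Int) + 8 * (k : Int))
        = (fun (j : Nat) =>
            String.ofList
              [Char.ofNat
                  ((PySem.Int.ofStrBase?
                          (PySem.Str.join ""
                            (PySem.List.slice (List.map PySem.Int.toStr (List.take (8 * ml.toNat) (List.map pvLsb (List.filter (fun v => v != 0) grid.flatten))))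
                              (some (((0 : Nat) : Int) + 8 * j)) (some (((0 : Nat) : Int) + 8 * j + 8))))
                          2).getD
                      0).toNat]) := by
      funext j
      have e1 : (0 : Int) + 8 * (j : Int) = ((0 : Nat) : Int) + 8 * (j : Int) := by norm_num
      rw [Function.comp_apply, e1]
    rw [hfeq, hchars]
    have hjoin : PySem.Str.join "" ((pvMsg ml.toNat (List.take (8 * ml.toNat) (List.map pvLsb (List.filter (fun v => v != 0) grid.flatten)))).map (fun c => String.ofList [c]))
        = String.ofList (pvMsg ml.toNat (List.take (8 * ml.toNat) (List.map pvLsb (List.filter (fun v => v != 0) grid.flatten)))) := by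
      refine String.toList_inj.mp ?_
      rw [PySem.Str.toList_join]
      simp only [List.map_map, String.toList_empty, String.toList_ofList, Function.comp_def]
      rw [PySem.Chars.join_nil_singletons]
    rw [hjoin, pvAltRows_eq]
    rw [← List.take_append_drop (8 * ml.toNat)
      (List.map pvLsb (List.filter (fun v => v != 0) grid.flatten))]
    rw [pvAltBits_run ml ml.toNat (List.take (8 * ml.toNat) (List.map pvLsb (List.filter (fun v => v != 0) grid.flatten)))
      (List.drop (8 * ml.toNat) (List.map pvLsb (List.filter (fun v => v != 0) grid.flatten)))
      [] (by omega) (by simp; omega) hbslen]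
    simp
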